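-- pv_equiv track=rewrite | github.com/henry-arjet-ss/python | Day_4_a.py | cap14
-- ===== SOURCE A (Python) =====
-- def cap14(s):
--     ret = ""
--     for i in range(0, len(s)):
--         if i == 0 or i == 3:
--             ret += s[i].upper()
--         else:
--             ret += s[i]
--     return ret
-- ===== SOURCE B (Python) =====
-- def cap14(s):
--     chars = list(s)
--     if len(chars) > 0:
--         chars[0] = chars[0].upper()
--     if len(chars) > 3:
--         chars[3] = chars[3].upper()
--     return "".join(chars)
-- ===== Notes on version B (the rewrite author's own statement) =====
-- stated objective: simpler
-- what changed: Instead of scanning every character and appending to a string with a branch per index, B converts to a char list, uppercases only positions 0 and 3 under length guards, and joins once.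
import Mathlib
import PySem

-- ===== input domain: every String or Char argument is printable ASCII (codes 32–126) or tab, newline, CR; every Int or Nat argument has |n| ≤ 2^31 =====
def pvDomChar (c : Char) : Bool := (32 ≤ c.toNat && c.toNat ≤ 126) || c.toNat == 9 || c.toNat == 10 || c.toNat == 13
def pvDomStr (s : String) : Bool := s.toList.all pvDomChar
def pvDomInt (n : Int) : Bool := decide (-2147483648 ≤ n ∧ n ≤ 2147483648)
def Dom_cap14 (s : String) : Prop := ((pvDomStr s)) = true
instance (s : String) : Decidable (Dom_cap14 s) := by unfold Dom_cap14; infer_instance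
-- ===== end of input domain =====

-- B differs from A by touching only positions 0 and 3 under length guards instead of scanning every character (objective: simpler).

-- ===== PORT A =====
-- loop over range(0, len(s)), appending s[i].upper() at i = 0 or 3, else s[i]
def cap14 (s : String) : String :=
  let cs := s.toList
  String.mk ((PySem.List.pyRange 0 cs.length 1).foldl
    (fun ret i =>
      if i = 0 ∨ i = 3 then ret ++ [PySem.Chars.upperChar (PySem.List.pyGetD cs i ' ')]
      else ret ++ [PySem.List.pyGetD cs i ' ']) [])

-- ===== PORT B =====
def cap14_alt (s : String) : String :=
  let cs := s.toList
  let cs1 := if 0 < cs.length then cs.set 0 (PySem.Chars.upperChar (PySem.List.pyGetD cs 0 ' ')) else cs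
  let cs2 := if 3 < cs1.length then cs1.set 3 (PySem.Chars.upperChar (PySem.List.pyGetD cs1 3 ' ')) else cs1
  String.mk cs2

-- ===== PRECONDITION & SPEC =====
def Spec_cap14 (s : String) (out : String) : Prop := out = cap14_alt s
instance (s : String) (out : String) : Decidable (Spec_cap14 s out) := by unfold Spec_cap14; infer_instance

-- ===== CLAIM (what is proved, stated in full; the proofs are below) =====
def Claim_equal_cap14 : Prop := ∀ (s : String), Dom_cap14 s → Spec_cap14 s (cap14 s)

-- ===== LEMMAS AND PROOFS =====

-- A's loop, rephrased: a map over enumerate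
lemma cap14_as_map (cs : List Char) :
    (PySem.List.pyRange 0 cs.length 1).foldl
      (fun ret i =>
        if i = 0 ∨ i = 3 then ret ++ [PySem.Chars.upperChar (PySem.List.pyGetD cs i ' ')]
        else ret ++ [PySem.List.pyGetD cs i ' ']) [] =
    (PySem.List.enumerate cs 0).map
      (fun p => if p.1 = 0 ∨ p.1 = 3 then PySem.Chars.upperChar p.2 else p.2) := by
  have hfun : (fun (ret : List Char) (i : Int) =>
      if i = 0 ∨ i = 3 then ret ++ [PySem.Chars.upperChar (PySem.List.pyGetD cs i ' ')]
      else ret ++ [PySem.List.pyGetD cs i ' ']) =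
      (fun ret i => ret ++ [if i = 0 ∨ i = 3 then PySem.Chars.upperChar (PySem.List.pyGetD cs i ' ')
        else PySem.List.pyGetD cs i ' ']) := by
    funext ret i; split_ifs <;> rfl
  rw [hfun, PySem.List.foldl_append_singleton_eq_map,
      PySem.List.enumerate_eq_map_pyRange (xs := cs) (d := ' '), List.map_map]
  simp [PySem.List.len]

-- identity on indices ≥ 4
lemma enum_map_tail (rest : List Char) (s : Int) (hs : 4 ≤ s) :
    (PySem.List.enumerate rest s).map
      (fun p => if p.1 = 0 ∨ p.1 = 3 then PySem.Chars.upperChar p.2 else p.2) = rest := by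
  induction rest generalizing s with
  | nil => simp [PySem.List.enumerate_nil]
  | cons c t ih =>
      rw [PySem.List.enumerate_cons, List.map_cons]
      have h1 : ¬ (s = 0 ∨ s = 3) := by omega
      rw [if_neg h1, ih (s + 1) (by omega)]


-- the two computations agree at the list level
lemma main_list (cs : List Char) :
    (PySem.List.enumerate cs 0).map
      (fun p => if p.1 = 0 ∨ p.1 = 3 then PySem.Chars.upperChar p.2 else p.2) =
    (if 3 < (if 0 < cs.length then cs.set 0 (PySem.Chars.upperChar (PySem.List.pyGetD cs 0 ' ')) else cs).length
     then (if 0 < cs.length then cs.set 0 (PySem.Chars.upperChar (PySem.List.pyGetD cs 0 ' ')) else cs).set 3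
        (PySem.Chars.upperChar (PySem.List.pyGetD
          (if 0 < cs.length then cs.set 0 (PySem.Chars.upperChar (PySem.List.pyGetD cs 0 ' ')) else cs) 3 ' '))
     else (if 0 < cs.length then cs.set 0 (PySem.Chars.upperChar (PySem.List.pyGetD cs 0 ' ')) else cs)) := by
  rcases cs with _ | ⟨a, _ | ⟨b, _ | ⟨c, _ | ⟨d, rest⟩⟩⟩⟩
  · simp [PySem.List.enumerate_nil]
  · simp [PySem.List.enumerate_cons, PySem.List.enumerate_nil, PySem.List.pyGetD,
      PySem.List.pyGet?, PySem.List.pyIdx?, List.set]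
  · simp [PySem.List.enumerate_cons, PySem.List.enumerate_nil, PySem.List.pyGetD,
      PySem.List.pyGet?, PySem.List.pyIdx?, List.set]
  · simp [PySem.List.enumerate_cons, PySem.List.enumerate_nil, PySem.List.pyGetD,
      PySem.List.pyGet?, PySem.List.pyIdx?, List.set]
  · have h0 : ((0:Int) ≤ (rest.length:Int) + 1 + 1 + 1) := by omega
    have h3 : ((3:Int) ≤ (rest.length:Int) + 1 + 1 + 1) := by omega
    simp [PySem.List.enumerate_cons, PySem.List.pyGetD, PySem.List.pyGet?, PySem.List.pyIdx?,
      List.set, h0, h3, enum_map_tail rest 4 (by norm_num)]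

-- ===== VERDICT (by name: the statement is the Claim_ definition above) =====
theorem cap14_spec : Claim_equal_cap14 := by
  intro s _
  unfold Spec_cap14 cap14 cap14_alt
  dsimp only
  rw [cap14_as_map, main_list]
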